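-- pv_equiv track=rewrite | github.com/ereinha/SYMBA | SYMBA_HEP/SYMBAHEP_Transformers_Abdulhakim_Alnuqaydan+Marco_Knipfer/data-generation-marty/QED/QED_loop_insertions_parallel.py | get_possible_n_to_m
-- ===== SOURCE A (Python) =====
-- from itertools import combinations_with_replacement, product, permutations, combinations
--
-- def particles_format(particles_list):
--     return ",".join(particles_list)
--
-- def get_possible_n_to_m(particles_list, n, m):
--     """
--     All thinkable n->m processes where in and out are not ordered (in and out separately)
--     e.g. (in_electron, in_electron, out_electron, out_electron, out_photon)
--          (in_electron, in_electron, out_electron, out_photon, out_electron)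
--          (in_electron, in_electron, out_photon, out_electron, out_electron)
--     """
--     in_list = ["in_"+p for p in particles_list]
--     out_list = ["out_"+p for p in particles_list]
--
--     possible_n_in = product(in_list, repeat=n)
--     possible_m_out = product(out_list, repeat=m)
--     possible_n_to_m = list(product(possible_n_in, possible_m_out))
--     possible_n_to_m = [sum(p, ()) for p in possible_n_to_m]
--     possible_n_to_m = [particles_format(p) for p in possible_n_to_m]
--
--     return possible_n_to_m
-- ===== SOURCE B (Python) =====
-- def get_possible_n_to_m(particles_list, n, m):
--     """Same enumeration, built by folding partial comma-joined strings over the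
--     pool sequence [in_list]*n + [out_list]*m (no tuples, no sum/join pipeline)."""
--     in_list = ["in_" + p for p in particles_list]
--     out_list = ["out_" + p for p in particles_list]
--     results = [""]
--     for pool in [in_list] * n + [out_list] * m:
--         results = [acc + ("," if acc else "") + x for acc in results for x in pool]
--     return results
-- ===== Notes on version B (the rewrite author's own statement) =====
-- stated objective: alternative
-- what changed: Replaces the itertools.product/tuple-sum/join pipeline by a single fold over the pool sequence [in_list]*n+[out_list]*m that grows partial comma-joined strings position by position.
import Mathlib
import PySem

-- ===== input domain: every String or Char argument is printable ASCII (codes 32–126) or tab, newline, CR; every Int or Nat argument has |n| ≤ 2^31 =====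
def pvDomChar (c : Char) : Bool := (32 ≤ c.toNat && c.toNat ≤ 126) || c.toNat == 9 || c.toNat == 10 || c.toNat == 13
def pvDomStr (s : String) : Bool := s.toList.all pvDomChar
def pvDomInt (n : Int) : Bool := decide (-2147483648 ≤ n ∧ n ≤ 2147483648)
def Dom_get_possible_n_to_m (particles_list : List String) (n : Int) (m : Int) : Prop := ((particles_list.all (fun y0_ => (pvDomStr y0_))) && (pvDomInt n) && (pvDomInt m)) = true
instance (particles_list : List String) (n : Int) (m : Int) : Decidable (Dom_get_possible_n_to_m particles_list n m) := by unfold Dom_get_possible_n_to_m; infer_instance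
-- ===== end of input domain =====

-- B replaces A's itertools.product/tuple-sum/join pipeline by a single fold that grows
-- partial comma-joined strings over the pool sequence [in_list]*n + [out_list]*m (alternative decomposition).

-- ===== PORT A =====
-- itertools.product(pool, repeat=k): leftmost position varies slowest
def pvProdRep (pool : List String) : Nat → List (List String)
  | 0 => [[]]
  | k+1 => pool.flatMap (fun x => (pvProdRep pool k).map (fun t => x :: t))

def particles_format (particles_list : List String) : String :=
  PySem.Str.join "," particles_list

def get_possible_n_to_m (particles_list : List String) (n : Int) (m : Int) : List String :=
  let in_list := particles_list.map (fun p => "in_" ++ p)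
  let out_list := particles_list.map (fun p => "out_" ++ p)
  let possible_n_in := pvProdRep in_list n.toNat
  let possible_m_out := pvProdRep out_list m.toNat
  let possible_n_to_m := possible_n_in.flatMap (fun a => possible_m_out.map (fun b => (a, b)))
  let summed := possible_n_to_m.map (fun p => p.1 ++ p.2)
  summed.map particles_format

-- ===== PORT B =====
def pvStep (results : List String) (pool : List String) : List String :=
  results.flatMap (fun acc => pool.map (fun x => acc ++ (if acc = "" then "" else ",") ++ x))

def get_possible_n_to_m_alt (particles_list : List String) (n : Int) (m : Int) : List String :=
  let in_list := particles_list.map (fun p => "in_" ++ p)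
  let out_list := particles_list.map (fun p => "out_" ++ p)
  -- Python's [pool]*n is empty for n < 0, matching Int.toNat
  (List.replicate n.toNat in_list ++ List.replicate m.toNat out_list).foldl pvStep [""]

-- ===== PRECONDITION & SPEC =====
-- A raises ValueError on a negative repeat count, so Pre_ requires 0 ≤ n and 0 ≤ m.
def Pre_get_possible_n_to_m (particles_list : List String) (n : Int) (m : Int) : Prop :=
  0 ≤ n ∧ 0 ≤ m
instance (particles_list : List String) (n : Int) (m : Int) : Decidable (Pre_get_possible_n_to_m particles_list n m) := by unfold Pre_get_possible_n_to_m; infer_instance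

def pvWitness_get_possible_n_to_m : List String × Int × Int := (["e", "p"], 1, 2)

def Spec_get_possible_n_to_m (particles_list : List String) (n : Int) (m : Int) (out : List String) : Prop := out = get_possible_n_to_m_alt particles_list n m
instance (particles_list : List String) (n : Int) (m : Int) (out : List String) : Decidable (Spec_get_possible_n_to_m particles_list n m out) := by unfold Spec_get_possible_n_to_m; infer_instance

-- ===== CLAIM (what is proved, stated in full; the proofs are below) =====
def Claim_equal_get_possible_n_to_m : Prop := ∀ (particles_list : List String) (n : Int) (m : Int), Dom_get_possible_n_to_m particles_list n m → Pre_get_possible_n_to_m particles_list n m → Spec_get_possible_n_to_m particles_list n m (get_possible_n_to_m particles_list n m)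


-- ===== LEMMAS AND PROOFS =====

-- cartesian product of an arbitrary pool sequence, leftmost slowest
def pvProdL : List (List String) → List (List String)
  | [] => [[]]
  | p :: ps => p.flatMap (fun x => (pvProdL ps).map (fun t => x :: t))

-- the string B accumulates from acc over the parts t
def pvCat (acc : String) (t : List String) : String :=
  t.foldl (fun a x => a ++ (if a = "" then "" else ",") ++ x) acc

theorem pvCat_cons (acc a : String) (t : List String) :
    pvCat acc (a :: t) = pvCat (acc ++ (if acc = "" then "" else ",") ++ a) t := rfl

theorem pvProdRep_eq (pool : List String) (k : Nat) :
    pvProdRep pool k = pvProdL (List.replicate k pool) := by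
  induction k with
  | zero => rfl
  | succ k ih => simp [pvProdRep, List.replicate_succ, pvProdL, ih]

theorem pvProdL_append (P Q : List (List String)) :
    pvProdL (P ++ Q) = (pvProdL P).flatMap (fun a => (pvProdL Q).map (fun b => a ++ b)) := by
  induction P with
  | nil => simp [pvProdL]
  | cons p ps ih =>
      simp [pvProdL, ih, List.flatMap_assoc, List.map_flatMap, List.flatMap_map,
        List.map_map, Function.comp_def]

theorem pvFoldStep (P : List (List String)) :
    ∀ R : List String, P.foldl pvStep R = R.flatMap (fun acc => (pvProdL P).map (pvCat acc)) := by
  induction P with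
  | nil => intro R; simp [pvProdL, pvCat]
  | cons p ps ih =>
      intro R
      simp only [List.foldl_cons, ih, pvStep, pvProdL]
      simp [List.flatMap_assoc, List.map_flatMap, List.flatMap_map, List.map_map,
        Function.comp_def, pvCat_cons]

theorem pv_append_ne_empty (a b : String) (ha : a ≠ "") : a ++ b ≠ "" := by
  intro h
  apply ha
  have h2 := congrArg String.toList h
  simp at h2
  exact String.ext_iff.mpr (by simp [h2.1])

theorem pv_join_cons_append (a b : String) (t : List String) :
    PySem.Str.join "," ((a ++ b) :: t) = a ++ PySem.Str.join "," (b :: t) := by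
  cases t with
  | nil => simp [PySem.Str.join, PySem.Chars.join_singleton]
  | cons x r => simp [PySem.Str.join, PySem.Chars.join_cons_cons]

theorem pvCat_ne (t : List String) : ∀ acc : String, acc ≠ "" →
    pvCat acc t = PySem.Str.join "," (acc :: t) := by
  induction t with
  | nil =>
      intro acc _
      rw [show ∀ a, pvCat a [] = a from fun _ => rfl]
      simp [PySem.Str.join, PySem.Chars.join_singleton]
  | cons x r ih =>
      intro acc hacc
      have h1 : pvCat acc (x :: r) = pvCat (acc ++ "," ++ x) r := by
        rw [pvCat_cons]; simp [hacc]
      have h2 : acc ++ "," ++ x ≠ "" := by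
        rw [String.append_assoc]
        exact pv_append_ne_empty _ _ hacc
      rw [h1, ih _ h2, String.append_assoc, pv_join_cons_append,
        pv_join_cons_append]
      simp [PySem.Str.join, PySem.Chars.join_cons_cons, String.ext_iff]

theorem pvCat_empty (t : List String) (ht : ∀ x ∈ t, x ≠ "") :
    pvCat "" t = PySem.Str.join "," t := by
  cases t with
  | nil =>
      rw [show ∀ a, pvCat a [] = a from fun _ => rfl]
      simp [PySem.Str.join, PySem.Chars.join_nil]
  | cons x r =>
      have hx : x ≠ "" := ht x (List.mem_cons_self ..)
      have h1 : pvCat "" (x :: r) = pvCat x r := by rw [pvCat_cons]; simp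
      rw [h1, pvCat_ne r x hx]

theorem pv_mem_prodL (P : List (List String)) (t : List String) (ht : t ∈ pvProdL P)
    (hP : ∀ p ∈ P, ∀ x ∈ p, x ≠ "") : ∀ x ∈ t, x ≠ "" := by
  induction P generalizing t with
  | nil => simp [pvProdL] at ht; subst ht; simp
  | cons p ps ih =>
      simp only [pvProdL, List.mem_flatMap, List.mem_map] at ht
      obtain ⟨y, hy, s, hs, rfl⟩ := ht
      intro x hx
      rcases List.mem_cons.mp hx with rfl | hx
      · exact hP p (by simp) x hy
      · exact ih s hs (fun q hq => hP q (by simp [hq])) x hx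

theorem pv_prefix_ne_empty (pre p : String) (h : pre.toList ≠ []) : pre ++ p ≠ "" := by
  apply pv_append_ne_empty
  intro hc
  apply h
  rw [hc]
  rfl

theorem pv_mem_prodRep_ne (pre : String) (hpre : pre.toList ≠ []) (pl : List String)
    (k : Nat) (t : List String) (ht : t ∈ pvProdRep (pl.map (fun p => pre ++ p)) k) :
    ∀ x ∈ t, x ≠ "" := by
  rw [pvProdRep_eq] at ht
  apply pv_mem_prodL _ _ ht
  intro p hp x hx
  rw [List.eq_of_mem_replicate hp] at hx
  obtain ⟨q, _, rfl⟩ := List.mem_map.mp hx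
  exact pv_prefix_ne_empty pre q hpre

-- ===== VERDICT (by name: the statement is the Claim_ definition above) =====
theorem get_possible_n_to_m_spec : Claim_equal_get_possible_n_to_m := by
  intro pl n m _ _
  unfold Spec_get_possible_n_to_m get_possible_n_to_m get_possible_n_to_m_alt
  simp only [pvFoldStep, pvProdL_append, ← pvProdRep_eq, List.flatMap_cons,
    List.flatMap_nil, List.append_nil, List.map_flatMap, List.map_map, Function.comp_def]
  apply List.flatMap_congr
  intro a ha
  apply List.map_congr_left
  intro b hb
  rw [particles_format, ← pvCat_empty]
  intro x hx
  rcases List.mem_append.mp hx with h | h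
  · exact pv_mem_prodRep_ne "in_" (by decide) pl n.toNat a ha x h
  · exact pv_mem_prodRep_ne "out_" (by decide) pl m.toNat b hb x h
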